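-- pv_equiv track=rewrite | github.com/DannyWeston/open-sfdi | src/opensfdi/colour.py | DetectableIndices
-- ===== SOURCE A (Python) =====
-- def DetectableIndices(values, delta):
--     start = finish = None
--
--     for i in range(1, len(values) - 1):
--         x1 = values[i - 1]
--         x2 = values[i]
--
--         y1 = values[len(values) - i - 1]
--         y2 = values[len(values) - i]
--
--         if not start and abs(x1 - x2) >= delta:
--             start = i
--
--         if not finish and abs(y1 - y2) >= delta:
--             finish = len(values) - i - 1
--
--     return start, finish
-- ===== SOURCE B (Python) =====
-- def DetectableIndices(values, delta):
--     # Materialise the adjacent-jump boolean table once, collect all qualifying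
--     # indices for each side, then select first / last.
--     jumps = [abs(a - b) >= delta for a, b in zip(values, values[1:])]
--     starts = [k + 1 for k in range(len(jumps) - 1) if jumps[k]]
--     finishes = [k for k in range(1, len(jumps)) if jumps[k]]
--     return (starts[0] if starts else None, finishes[-1] if finishes else None)
-- ===== Notes on version B (the rewrite author's own statement) =====
-- stated objective: alternative
-- what changed: Replaces A's single interleaved symmetric latch loop (both ends checked per iteration with 'not start'/'not finish' flags and mirrored index arithmetic) by a table-then-select pipeline: materialise the adjacent-jump boolean table once via zip, collect all qualifying indices per side by comprehension, then select the first and the last.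
import Mathlib
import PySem

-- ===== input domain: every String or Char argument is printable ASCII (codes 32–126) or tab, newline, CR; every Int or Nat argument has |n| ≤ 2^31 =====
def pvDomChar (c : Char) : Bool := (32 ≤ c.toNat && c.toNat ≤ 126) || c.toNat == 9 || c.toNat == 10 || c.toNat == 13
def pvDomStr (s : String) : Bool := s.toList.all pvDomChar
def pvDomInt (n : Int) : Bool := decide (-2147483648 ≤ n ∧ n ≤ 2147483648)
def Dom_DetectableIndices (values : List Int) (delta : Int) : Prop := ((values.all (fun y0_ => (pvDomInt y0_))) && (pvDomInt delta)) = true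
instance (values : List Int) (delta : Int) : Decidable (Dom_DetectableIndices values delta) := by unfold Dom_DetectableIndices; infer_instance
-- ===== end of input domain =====

-- B replaces A's interleaved symmetric latch loop by a table-then-select pipeline:
-- materialise the adjacent-jump boolean table once (zip), collect the qualifying
-- indices for each side by comprehension, and select first / last (alternative
-- decomposition; same O(n) cost).

-- ===== PORT A =====
-- Python truthiness of 'not start' for start : Option Int (None or 0 are falsy)
def pyFalsyOptInt : Option Int → Bool
  | none => true
  | some v => v == 0

def DetectableIndices (values : List Int) (delta : Int) : Option Int × Option Int :=
  -- indices touched by the loop are always in range, so pyGetD with default 0 is exact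
  (PySem.List.pyRange 1 ((values.length : Int) - 1) 1).foldl
    (fun (st : Option Int × Option Int) i =>
      let x1 := PySem.List.pyGetD values (i - 1) 0
      let x2 := PySem.List.pyGetD values i 0
      let y1 := PySem.List.pyGetD values ((values.length : Int) - i - 1) 0
      let y2 := PySem.List.pyGetD values ((values.length : Int) - i) 0
      let start := if pyFalsyOptInt st.1 = true ∧ delta ≤ |x1 - x2| then some i else st.1
      let finish := if pyFalsyOptInt st.2 = true ∧ delta ≤ |y1 - y2| then
          some ((values.length : Int) - i - 1) else st.2
      (start, finish))
    (none, none)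

-- ===== PORT B =====
def DetectableIndices_alt (values : List Int) (delta : Int) : Option Int × Option Int :=
  -- jumps = [abs(a - b) >= delta for a, b in zip(values, values[1:])]
  let jumps : List Bool :=
    (values.zip (PySem.List.slice values (some 1) none)).map
      (fun p => decide (delta ≤ |p.1 - p.2|))
  -- starts = [k + 1 for k in range(len(jumps) - 1) if jumps[k]]
  let starts : List Int :=
    ((PySem.List.pyRange 0 ((jumps.length : Int) - 1) 1).filter
      (fun k => PySem.List.pyGetD jumps k false)).map (· + 1)
  -- finishes = [k for k in range(1, len(jumps)) if jumps[k]]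
  let finishes : List Int :=
    (PySem.List.pyRange 1 (jumps.length : Int) 1).filter
      (fun k => PySem.List.pyGetD jumps k false)
  (starts.head?, finishes.getLast?)

-- ===== PRECONDITION & SPEC =====
def Spec_DetectableIndices (values : List Int) (delta : Int) (out : Option Int × Option Int) : Prop := out = DetectableIndices_alt values delta
instance (values : List Int) (delta : Int) (out : Option Int × Option Int) : Decidable (Spec_DetectableIndices values delta out) := by unfold Spec_DetectableIndices; infer_instance

-- ===== CLAIM (what is proved, stated in full; the proofs are below) =====
def Claim_equal_DetectableIndices : Prop := ∀ (values : List Int) (delta : Int), Dom_DetectableIndices values delta → Spec_DetectableIndices values delta (DetectableIndices values delta)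

-- ===== LEMMAS AND PROOFS =====

-- a fold whose two state components are updated independently splits into two folds
theorem foldl_prod_indep {α : Type} (f g : Option Int → α → Option Int)
    (L : List α) (a b : Option Int) :
    L.foldl (fun (st : Option Int × Option Int) i => (f st.1 i, g st.2 i)) (a, b)
      = (L.foldl f a, L.foldl g b) := by
  induction L generalizing a b with
  | nil => rfl
  | cons h t ih => simpa using ih (f a h) (g b h)

-- once latched to a nonzero value, the latch fold never changes
theorem foldl_latch_stay (p : Int → Bool) (g : Int → Int) (L : List Int)
    (v : Int) (hv : v ≠ 0) :
    L.foldl (fun s i => if pyFalsyOptInt s = true ∧ p i = true then some (g i) else s)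
      (some v) = some v := by
  induction L with
  | nil => rfl
  | cons h t ih =>
    have : pyFalsyOptInt (some v) = false := by
      simp [pyFalsyOptInt, hv]
    simp only [List.foldl_cons, this]
    simpa using ih

-- A's latch fold computes the image under g of the first match
theorem foldl_latch_eq_find (p : Int → Bool) (g : Int → Int) (L : List Int)
    (hg : ∀ i ∈ L, g i ≠ 0) :
    L.foldl (fun s i => if pyFalsyOptInt s = true ∧ p i = true then some (g i) else s) none
      = (L.find? p).map g := by
  induction L with
  | nil => rfl
  | cons h t ih =>
    simp only [List.foldl_cons]
    by_cases hp : p h = true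
    · rw [List.find?_cons_of_pos hp]
      have hcond : (if pyFalsyOptInt none = true ∧ p h = true then some (g h) else none)
          = some (g h) := by simp [pyFalsyOptInt, hp]
      rw [hcond]
      simpa using foldl_latch_stay p g t (g h) (hg h (by simp))
    · rw [List.find?_cons_of_neg (by simpa using hp)]
      have hcond : (if pyFalsyOptInt none = true ∧ p h = true then some (g h) else none)
          = none := by simp [hp]
      rw [hcond]
      exact ih (fun i hi => hg i (by simp [hi]))

-- the countdown range is the image of the forward range under the mirror map
theorem pyRange_countdown_eq_map_mirror (n : Int) :
    PySem.List.pyRange (n - 2) 0 (-1)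
      = (PySem.List.pyRange 1 (n - 1) 1).map (fun i => n - i - 1) := by
  rw [PySem.List.pyRange_neg_one, PySem.List.pyRange_one, List.map_map]
  have h2 : (n - 1 - 1).toNat = (n - 2 - 0).toNat := by omega
  rw [h2]
  exact List.map_congr_left (fun k _ => by simp; omega)

-- A's result expressed as two directed first-match searches
theorem A_eq_find (values : List Int) (delta : Int) :
    DetectableIndices values delta =
      ((PySem.List.pyRange 1 ((values.length : Int) - 1) 1).find?
        (fun i => decide (delta ≤ |PySem.List.pyGetD values (i - 1) 0 - PySem.List.pyGetD values i 0|)),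
       (PySem.List.pyRange ((values.length : Int) - 2) 0 (-1)).find?
        (fun j => decide (delta ≤ |PySem.List.pyGetD values j 0 - PySem.List.pyGetD values (j + 1) 0|))) := by
  unfold DetectableIndices
  have hsplit := foldl_prod_indep
    (fun s i => if pyFalsyOptInt s = true ∧
        decide (delta ≤ |PySem.List.pyGetD values (i - 1) 0 - PySem.List.pyGetD values i 0|) = true
        then some i else s)
    (fun s i => if pyFalsyOptInt s = true ∧
        decide (delta ≤ |PySem.List.pyGetD values ((values.length : Int) - i - 1) 0 -
          PySem.List.pyGetD values ((values.length : Int) - i) 0|) = true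
        then some ((values.length : Int) - i - 1) else s)
    (PySem.List.pyRange 1 ((values.length : Int) - 1) 1) none none
  simp only [decide_eq_true_eq] at hsplit
  rw [hsplit]
  rw [Prod.mk.injEq]
  constructor
  · have h1 := foldl_latch_eq_find
      (fun i => decide (delta ≤ |PySem.List.pyGetD values (i - 1) 0 - PySem.List.pyGetD values i 0|))
      id (PySem.List.pyRange 1 ((values.length : Int) - 1) 1)
      (fun i hi => by
        have := (PySem.List.mem_pyRange_one).mp hi
        simp only [id_eq]; omega)
    simp only [decide_eq_true_eq, Option.map_id, id] at h1
    exact h1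
  · have hlatch := foldl_latch_eq_find
      (fun i => decide (delta ≤ |PySem.List.pyGetD values ((values.length : Int) - i - 1) 0 -
        PySem.List.pyGetD values ((values.length : Int) - i) 0|))
      (fun i => (values.length : Int) - i - 1)
      (PySem.List.pyRange 1 ((values.length : Int) - 1) 1)
      (fun i hi => by
        have := (PySem.List.mem_pyRange_one).mp hi
        show (values.length : Int) - i - 1 ≠ 0
        omega)
    simp only [decide_eq_true_eq] at hlatch
    rw [hlatch, pyRange_countdown_eq_map_mirror (values.length : Int), List.find?_map]
    have hfun : ((fun j => decide (delta ≤ |PySem.List.pyGetD values j 0 - PySem.List.pyGetD values (j + 1) 0|))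
          ∘ fun i => (values.length : Int) - i - 1)
        = fun i => decide (delta ≤ |PySem.List.pyGetD values ((values.length : Int) - i - 1) 0 -
            PySem.List.pyGetD values ((values.length : Int) - i) 0|) := by
      funext i
      have h2 : (values.length : Int) - i - 1 + 1 = (values.length : Int) - i := by omega
      simp [Function.comp, h2]
    rw [hfun]

-- B's jump table read at an in-range index is the adjacent-difference test on values
theorem jumps_get (values : List Int) (delta : Int) (k : Int)
    (h0 : 0 ≤ k)
    (hk : k < ((values.zip (PySem.List.slice values (some 1) none)).length : Int)) :
    PySem.List.pyGetD
        ((values.zip (PySem.List.slice values (some 1) none)).map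
          (fun p => decide (delta ≤ |p.1 - p.2|))) k false
      = decide (delta ≤ |PySem.List.pyGetD values k 0 - PySem.List.pyGetD values (k + 1) 0|) := by
  rw [PySem.List.slice_from _ (by norm_num : (0:Int) ≤ 1)] at *
  obtain ⟨m, rfl⟩ : ∃ m : Nat, k = (m : Int) := ⟨k.toNat, by omega⟩
  simp only [List.length_zip, List.length_drop] at hk
  have hm : m < values.length - 1 := by
    have := Int.lt_of_lt_of_le hk (by exact_mod_cast Nat.cast_le.mpr (min_le_right _ _))
    omega
  have hm1 : m + 1 < values.length := by omega
  have h1 : ((m : Int) + 1) = ((m + 1 : Nat) : Int) := by push_cast; ring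
  rw [PySem.List.pyGetD_natCast, PySem.List.pyGetD_natCast, h1, PySem.List.pyGetD_natCast]
  have hmz : m < (values.zip (values.drop 1)).length := by
    simp only [List.length_zip, List.length_drop]; omega
  rw [List.getD_eq_getElem _ _ (by simpa using hmz),
      List.getD_eq_getElem _ _ (by omega), List.getD_eq_getElem _ _ hm1]
  simp [List.getElem_zip]

theorem B_eq_find (values : List Int) (delta : Int) :
    DetectableIndices_alt values delta =
      ((PySem.List.pyRange 1 ((values.length : Int) - 1) 1).find?
        (fun i => decide (delta ≤ |PySem.List.pyGetD values (i - 1) 0 - PySem.List.pyGetD values i 0|)),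
       (PySem.List.pyRange ((values.length : Int) - 2) 0 (-1)).find?
        (fun j => decide (delta ≤ |PySem.List.pyGetD values j 0 - PySem.List.pyGetD values (j + 1) 0|))) := by
  unfold DetectableIndices_alt
  cases values with
  | nil => rfl
  | cons a t =>
  set values := a :: t with hv
  set jumps := (values.zip (PySem.List.slice values (some 1) none)).map
      (fun p => decide (delta ≤ |p.1 - p.2|)) with hj
  have hzl : (values.zip (PySem.List.slice values (some 1) none)).length = jumps.length := by
    rw [hj, List.length_map]
  have hlen : (jumps.length : Int) = (values.length : Int) - 1 := by
    rw [← hzl, PySem.List.slice_from _ (by norm_num : (0:Int) ≤ 1)]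
    rw [hv]
    simp only [List.length_zip, List.length_drop]
    simp
  rw [Prod.mk.injEq]
  constructor
  · -- start component
    rw [List.head?_map, List.head?_filter]
    have hshift : PySem.List.pyRange 1 ((values.length : Int) - 1) 1
        = (PySem.List.pyRange 0 ((jumps.length : Int) - 1) 1).map (· + 1) := by
      rw [PySem.List.pyRange_one, PySem.List.pyRange_one, List.map_map]
      have ht : ((jumps.length : Int) - 1 - 0).toNat = ((values.length : Int) - 1 - 1).toNat := by
        omega
      rw [ht]
      refine List.map_congr_left (fun k _ => ?_)
      simp only [Function.comp]
      omega
    rw [hshift, List.find?_map]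
    congr 1
    rw [← List.head?_filter, ← List.head?_filter]
    congr 1
    apply List.filter_congr
    intro k hk
    have hkb := (PySem.List.mem_pyRange_one).mp hk
    have hget := jumps_get values delta k hkb.1 (by rw [hzl]; omega)
    rw [← hj] at hget
    simp only [Function.comp]
    have hs1 : k + 1 - 1 = k := by ring
    rw [hs1, hget]
  · -- finish component
    rw [List.getLast?_filter]
    have hrev : (PySem.List.pyRange 1 ((jumps.length : Int)) 1).reverse
        = PySem.List.pyRange ((values.length : Int) - 2) 0 (-1) := by
      rw [PySem.List.pyRange_neg_one_eq_reverse]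
      have h1 : (0 : Int) + 1 = 1 := by norm_num
      have h2 : (values.length : Int) - 2 + 1 = (jumps.length : Int) := by omega
      rw [h1, h2]
    rw [hrev]
    rw [← List.head?_filter, ← List.head?_filter]
    congr 1
    apply List.filter_congr
    intro j hjm
    have hjb := (PySem.List.mem_pyRange_neg_one).mp hjm
    have hget := jumps_get values delta j (by omega) (by rw [hzl]; omega)
    rw [← hj] at hget
    rw [hget]

-- ===== VERDICT (by name: the statement is the Claim_ definition above) =====
theorem DetectableIndices_spec : Claim_equal_DetectableIndices := by
  intro values delta _
  unfold Spec_DetectableIndices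
  rw [A_eq_find, B_eq_find]
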